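-- pv_equiv track=rewrite | github.com/ChrysanKwon/Mahjong | reinforcement/Mahjong_yaku_Reinforcement.py | Thirteen_orphans
-- ===== SOURCE A (Python) =====
-- from copy import copy
--
-- def Thirteen_orphans(hand):
--     #thirteen是聽13張的情況
--     thirteen = [0,8,9,17,18,26,27,28,29,30,31,32,33]
--     #複製手牌來計算出牌，count是有效牌數量
--     discard=copy(hand)
--     count=0
--     for tile in thirteen:
--         if tile in discard:
--             discard.remove(tile)
--             count+=1
--         else:
--             pass
--     for tile in thirteen:
--         if tile in discard:
--             discard.remove(tile)
--             count+=1
--             break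
--         else:
--             pass
--     return count,discard
-- ===== SOURCE B (Python) =====
-- def Thirteen_orphans(hand):
--     thirteen = [0,8,9,17,18,26,27,28,29,30,31,32,33]
--     # one-pass tally of the hand
--     counts = {}
--     for t in hand:
--         counts[t] = counts.get(t, 0) + 1
--     # removal table: one copy of each orphan present, plus one extra for the
--     # first orphan (in thirteen-order) held at least twice
--     r = {}
--     count = 0
--     for v in thirteen:
--         if counts.get(v, 0) > 0:
--             r[v] = 1
--             count += 1
--     for v in thirteen:
--         if counts.get(v, 0) >= 2:
--             r[v] = r.get(v, 0) + 1
--             count += 1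
--             break
--     # single pass over the hand skipping the first r[t] occurrences of each t
--     discard = []
--     for t in hand:
--         if r.get(t, 0) > 0:
--             r[t] = r[t] - 1
--         else:
--             discard.append(t)
--     return count, discard
-- ===== Notes on version B (the rewrite author's own statement) =====
-- stated objective: alternative
-- what changed: Replaces A's repeated membership-test-and-remove mutations of a hand copy by a one-pass tally dict, a 13-entry removal table built from the counts, and a single skip pass over the hand that emits the discard list.
import Mathlib
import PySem

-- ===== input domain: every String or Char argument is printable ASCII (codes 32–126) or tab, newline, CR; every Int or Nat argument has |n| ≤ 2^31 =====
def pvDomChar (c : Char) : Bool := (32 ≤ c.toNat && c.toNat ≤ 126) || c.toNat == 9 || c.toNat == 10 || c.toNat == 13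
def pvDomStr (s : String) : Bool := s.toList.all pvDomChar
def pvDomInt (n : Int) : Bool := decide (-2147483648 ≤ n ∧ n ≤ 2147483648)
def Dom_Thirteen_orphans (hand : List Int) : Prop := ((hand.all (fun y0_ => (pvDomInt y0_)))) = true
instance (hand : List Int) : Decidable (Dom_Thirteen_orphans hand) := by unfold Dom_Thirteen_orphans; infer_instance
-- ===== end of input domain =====

-- B replaces A's quadratic membership-test-and-remove passes over the hand by a tally dict,
-- a 13-entry removal table and one skip pass over the hand (objective: alternative/faster on
-- large hands by mechanism; return value proved identical).

-- ===== PORT A =====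
def thirteenL : List Int := [0, 8, 9, 17, 18, 26, 27, 28, 29, 30, 31, 32, 33]

-- first for-loop: remove one copy of each orphan present, counting
-- (`discard.remove(tile)` under the `tile in discard` guard is `List.erase`: PySem.List.remove?_eq_some_erase)
def pass1A : List Int → Int × List Int → Int × List Int
  | [], s => s
  | t :: rest, (c, xs) =>
    if t ∈ xs then pass1A rest (c + 1, xs.erase t) else pass1A rest (c, xs)

-- second for-loop with break: remove one more copy of the first orphan still present
def pass2A : List Int → Int × List Int → Int × List Int
  | [], s => s
  | t :: rest, (c, xs) =>
    if t ∈ xs then (c + 1, xs.erase t) else pass2A rest (c, xs)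

def Thirteen_orphans (hand : List Int) : Int × List Int :=
  pass2A thirteenL (pass1A thirteenL (0, hand))

-- ===== PORT B =====
def thirteenB : List Int := [0, 8, 9, 17, 18, 26, 27, 28, 29, 30, 31, 32, 33]

-- `for v in thirteen: if counts.get(v,0) > 0: r[v] = 1; count += 1`
def pass1B (counts : PySem.Dict Int Int) : List Int → PySem.Dict Int Int × Int → PySem.Dict Int Int × Int
  | [], s => s
  | v :: rest, (r, c) =>
    if 0 < counts.getD v 0 then pass1B counts rest (r.insert v 1, c + 1)
    else pass1B counts rest (r, c)

-- `for v in thirteen: if counts.get(v,0) >= 2: r[v] = r.get(v,0) + 1; count += 1; break`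
def pass2B (counts : PySem.Dict Int Int) : List Int → PySem.Dict Int Int × Int → PySem.Dict Int Int × Int
  | [], s => s
  | v :: rest, (r, c) =>
    if 2 ≤ counts.getD v 0 then (r.insert v (r.getD v 0 + 1), c + 1)
    else pass2B counts rest (r, c)

-- `for t in hand: if r.get(t,0) > 0: r[t] = r[t] - 1 else: discard.append(t)`
def skipPass : List Int → PySem.Dict Int Int × List Int → PySem.Dict Int Int × List Int
  | [], s => s
  | t :: rest, (r, acc) =>
    if 0 < r.getD t 0 then skipPass rest (r.insert t (r.getD t 0 - 1), acc)
    else skipPass rest (r, acc ++ [t])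

def Thirteen_orphans_alt (hand : List Int) : Int × List Int :=
  let counts := hand.foldl (fun d t => d.insert t (d.getD t 0 + 1)) PySem.Dict.empty
  let s1 := pass1B counts thirteenB (PySem.Dict.empty, 0)
  let s2 := pass2B counts thirteenB s1
  (s2.2, (skipPass hand (s2.1, [])).2)

-- ===== PRECONDITION & SPEC =====
def Spec_Thirteen_orphans (hand : List Int) (out : Int × List Int) : Prop := out = Thirteen_orphans_alt hand
instance (hand : List Int) (out : Int × List Int) : Decidable (Spec_Thirteen_orphans hand out) := by unfold Spec_Thirteen_orphans; infer_instance

-- ===== CLAIM (what is proved, stated in full; the proofs are below) =====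
def Claim_equal_Thirteen_orphans : Prop := ∀ (hand : List Int), Dom_Thirteen_orphans hand → Spec_Thirteen_orphans hand (Thirteen_orphans hand)

-- ===== LEMMAS AND PROOFS =====

-- the dict of a state viewed as an Int-valued removal function
def fD (r : PySem.Dict Int Int) : Int → Int := fun v => r.getD v 0

-- abstract skip pass: drop the first (f x) occurrences of each value x
def skipf (f : Int → Int) : List Int → List Int
  | [] => []
  | x :: xs => if 0 < f x then skipf (Function.update f x (f x - 1)) xs else x :: skipf f xs

theorem fD_insert (r : PySem.Dict Int Int) (k a : Int) :
    fD (r.insert k a) = Function.update (fD r) k a := by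
  funext v
  simp [fD, PySem.Dict.getD_insert, Function.update, eq_comm]

theorem fD_empty : fD (PySem.Dict.empty : PySem.Dict Int Int) = fun _ => 0 := by
  funext v; simp [fD, PySem.Dict.getD_empty]

theorem fD_empty_apply (v : Int) : fD (PySem.Dict.empty : PySem.Dict Int Int) v = 0 := by
  simp [fD, PySem.Dict.getD_empty]

theorem skipf_of_nonpos (f : Int → Int) (h : ∀ x, ¬ 0 < f x) : ∀ xs, skipf f xs = xs := by
  intro xs
  induction xs with
  | nil => rfl
  | cons x xs ih => simp [skipf, h x, ih]

theorem mem_skipf (v : Int) : ∀ (xs : List Int) (f : Int → Int), 0 ≤ f v →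
    (v ∈ skipf f xs ↔ f v < (xs.count v : Int)) := by
  intro xs
  induction xs with
  | nil =>
    intro f hv
    simp only [skipf, List.not_mem_nil, List.count_nil, Nat.cast_zero, false_iff]
    omega
  | cons x xs ih =>
    intro f hv
    by_cases hx : 0 < f x
    · rw [skipf, if_pos hx]
      have hv' : 0 ≤ Function.update f x (f x - 1) v := by
        by_cases h : v = x
        · subst h; rw [Function.update_self]; omega
        · rw [Function.update_of_ne h]; exact hv
      rw [ih _ hv', List.count_cons]
      simp only [beq_iff_eq]
      push_cast
      by_cases h : v = x
      · subst h; rw [Function.update_self, if_pos rfl]; omega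
      · rw [Function.update_of_ne h, if_neg (fun hh => h hh.symm)]; omega
    · rw [skipf, if_neg hx, List.mem_cons, ih f hv, List.count_cons]
      simp only [beq_iff_eq]
      push_cast
      by_cases h : v = x
      · subst h
        rw [if_pos rfl]
        constructor
        · intro _; omega
        · intro _; exact Or.inl rfl
      · rw [if_neg (fun hh => h hh.symm)]
        simp only [h, false_or]
        omega

theorem erase_skipf (v : Int) : ∀ (xs : List Int) (f : Int → Int), 0 ≤ f v →
    (skipf f xs).erase v = skipf (Function.update f v (f v + 1)) xs := by
  intro xs
  induction xs with
  | nil => intro f _; rfl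
  | cons x xs ih =>
    intro f hv
    by_cases hx : 0 < f x
    · by_cases hvx : x = v
      · subst hvx
        have h1 : 0 < Function.update f x (f x + 1) x := by rw [Function.update_self]; omega
        have h2 : Function.update (Function.update f x (f x + 1)) x
            (Function.update f x (f x + 1) x - 1) = f := by
          funext w; by_cases hw : w = x <;> simp [Function.update, hw]
        have h3 : Function.update (Function.update f x (f x - 1)) x
            (Function.update f x (f x - 1) x + 1) = f := by
          funext w; by_cases hw : w = x <;> simp [Function.update, hw]
        rw [skipf, if_pos hx, skipf, if_pos h1, h2,
          ih (Function.update f x (f x - 1)) (by rw [Function.update_self]; omega), h3]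
      · have h1 : 0 < Function.update f v (f v + 1) x := by
          rw [Function.update_of_ne hvx]; exact hx
        rw [skipf, if_pos hx, skipf, if_pos h1]
        have e : Function.update (Function.update f v (f v + 1)) x
            (Function.update f v (f v + 1) x - 1)
            = Function.update (Function.update f x (f x - 1)) v
              (Function.update f x (f x - 1) v + 1) := by
          rw [Function.update_of_ne hvx, Function.update_of_ne (fun h => hvx h.symm),
            Function.update_comm (fun h : v = x => hvx h.symm)]
        rw [e, ← ih (Function.update f x (f x - 1))
          (by rw [Function.update_of_ne (fun h => hvx h.symm)]; exact hv)]
    · by_cases hvx : x = v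
      · subst hvx
        have hx0 : f x = 0 := by omega
        have h1 : 0 < Function.update f x (f x + 1) x := by rw [Function.update_self]; omega
        have h2 : Function.update (Function.update f x (f x + 1)) x
            (Function.update f x (f x + 1) x - 1) = f := by
          funext w; by_cases hw : w = x <;> simp [Function.update, hw, hx0]
        rw [skipf, if_neg hx, skipf, if_pos h1, h2, List.erase_cons_head]
      · have h1 : ¬ 0 < Function.update f v (f v + 1) x := by
          rw [Function.update_of_ne hvx]; exact hx
        rw [skipf, if_neg hx, skipf, if_neg h1,
          List.erase_cons_tail (by simp [hvx]), ih f hv]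

theorem skipPass_eq : ∀ (xs : List Int) (r : PySem.Dict Int Int) (acc : List Int),
    (skipPass xs (r, acc)).2 = acc ++ skipf (fD r) xs := by
  intro xs
  induction xs with
  | nil => intro r acc; simp [skipPass, skipf]
  | cons t rest ih =>
    intro r acc
    by_cases ht : 0 < r.getD t 0
    · have ht' : 0 < fD r t := ht
      rw [skipPass, if_pos ht, ih, skipf, if_pos ht', fD_insert]
      rfl
    · have ht' : ¬ 0 < fD r t := ht
      rw [skipPass, if_neg ht, ih, skipf, if_neg ht']
      simp

-- joint invariant for the first passes of A and B
theorem pass1_eq (hand : List Int) (counts : PySem.Dict Int Int)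
    (Hc : ∀ v, counts.getD v 0 = (hand.count v : Int)) :
    ∀ (L : List Int), L.Nodup → ∀ (c : Int) (r : PySem.Dict Int Int), (∀ v ∈ L, fD r v = 0) →
    pass1A L (c, skipf (fD r) hand)
      = ((pass1B counts L (r, c)).2, skipf (fD (pass1B counts L (r, c)).1) hand)
    ∧ ∀ v, fD (pass1B counts L (r, c)).1 v = if v ∈ L ∧ v ∈ hand then 1 else fD r v := by
  intro L
  induction L with
  | nil =>
    intro _ c r _
    refine ⟨rfl, fun v => ?_⟩
    simp [pass1B]
  | cons v rest ih =>
    intro hnd c r hr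
    have hv0 : fD r v = 0 := hr v (by simp)
    have hndr : rest.Nodup := (List.nodup_cons.mp hnd).2
    have hvr : v ∉ rest := (List.nodup_cons.mp hnd).1
    have hmem : v ∈ skipf (fD r) hand ↔ 0 < counts.getD v 0 := by
      rw [mem_skipf v hand (fD r) (by omega), hv0, Hc]
    by_cases hc : 0 < counts.getD v 0
    · -- orphan v present in the hand
      have hvh : v ∈ hand := by
        have h' : (0 : Int) < (hand.count v : Int) := by rw [← Hc]; exact hc
        exact List.count_pos_iff.mp (by exact_mod_cast h')
      have hA : v ∈ skipf (fD r) hand := hmem.mpr hc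
      have hupd : fD (r.insert v 1) = Function.update (fD r) v (fD r v + 1) := by
        rw [fD_insert, hv0]; norm_num
      have hr' : ∀ w ∈ rest, fD (r.insert v 1) w = 0 := by
        intro w hw
        rw [fD_insert, Function.update_of_ne (fun (h : w = v) => hvr (h ▸ hw))]
        exact hr w (by simp [hw])
      obtain ⟨ihA, ihr⟩ := ih hndr (c + 1) (r.insert v 1) hr'
      constructor
      · rw [pass1A, if_pos hA, erase_skipf v hand (fD r) (by omega), ← hupd, ihA,
          pass1B, if_pos hc]
      · intro w
        rw [pass1B, if_pos hc, ihr w]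
        by_cases hw : w = v
        · subst hw
          simp [hvr, hvh, fD_insert]
        · by_cases hwr : w ∈ rest ∧ w ∈ hand
          · simp [List.mem_cons, hwr.1, hwr.2]
          · have hwr' : ¬ (w ∈ v :: rest ∧ w ∈ hand) := by
              simp only [List.mem_cons]; tauto
            rw [if_neg hwr, if_neg hwr', fD_insert, Function.update_of_ne hw]
    · -- orphan v absent from the hand
      have hA : v ∉ skipf (fD r) hand := fun h => hc (hmem.mp h)
      have hvh : v ∉ hand := by
        intro h
        apply hc
        rw [Hc]
        exact_mod_cast List.count_pos_iff.mpr h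
      obtain ⟨ihA, ihr⟩ := ih hndr c r (fun w hw => hr w (by simp [hw]))
      constructor
      · rw [pass1A, if_neg hA, ihA, pass1B, if_neg hc]
      · intro w
        rw [pass1B, if_neg hc, ihr w]
        by_cases hw : w = v
        · subst hw
          simp [hvr, hvh, hv0]
        · by_cases hcond : w ∈ rest ∧ w ∈ hand
          · simp [List.mem_cons, hcond.1, hcond.2]
          · have hcond' : ¬ (w ∈ v :: rest ∧ w ∈ hand) := by
              simp only [List.mem_cons]; tauto
            rw [if_neg hcond, if_neg hcond']

-- joint invariant for the second (break) passes of A and B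
theorem pass2_eq (hand : List Int) (counts : PySem.Dict Int Int)
    (Hc : ∀ v, counts.getD v 0 = (hand.count v : Int)) :
    ∀ (L : List Int) (c : Int) (r : PySem.Dict Int Int),
    (∀ v ∈ L, 0 ≤ fD r v ∧ (fD r v < (hand.count v : Int) ↔ 2 ≤ (hand.count v : Int))) →
    pass2A L (c, skipf (fD r) hand)
      = ((pass2B counts L (r, c)).2, skipf (fD (pass2B counts L (r, c)).1) hand) := by
  intro L
  induction L with
  | nil => intro c r _; rfl
  | cons v rest ih =>
    intro c r hr
    obtain ⟨hnn, hiff⟩ := hr v (by simp)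
    have hmem : v ∈ skipf (fD r) hand ↔ 2 ≤ counts.getD v 0 := by
      rw [mem_skipf v hand (fD r) hnn, Hc v]
      exact hiff
    by_cases hc : 2 ≤ counts.getD v 0
    · have hA : v ∈ skipf (fD r) hand := hmem.mpr hc
      rw [pass2A, if_pos hA, pass2B, if_pos hc,
        erase_skipf v hand (fD r) hnn, fD_insert]
      rfl
    · have hA : v ∉ skipf (fD r) hand := fun h => hc (hmem.mp h)
      rw [pass2A, if_neg hA, pass2B, if_neg hc,
        ih c r (fun w hw => hr w (by simp [hw]))]

-- ===== VERDICT (by name: the statement is the Claim_ definition above) =====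
theorem Thirteen_orphans_spec : Claim_equal_Thirteen_orphans := by
  intro hand _
  show Thirteen_orphans hand = Thirteen_orphans_alt hand
  have Hc : ∀ v, (hand.foldl (fun d t => d.insert t (d.getD t 0 + 1))
      (PySem.Dict.empty : PySem.Dict Int Int)).getD v 0 = (hand.count v : Int) := by
    intro v
    rw [PySem.Dict.foldl_insert_getD_add_one_eq_counter, PySem.Dict.getD_counter]
  set counts := hand.foldl (fun d t => d.insert t (d.getD t 0 + 1))
      (PySem.Dict.empty : PySem.Dict Int Int) with hcounts
  have hstart : hand = skipf (fD PySem.Dict.empty) hand := by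
    rw [fD_empty, skipf_of_nonpos _ (fun x => by omega)]
  obtain ⟨h1, h1r⟩ := pass1_eq hand counts Hc thirteenL (by decide) 0 PySem.Dict.empty
    (fun w _ => fD_empty_apply w)
  set s1 := pass1B counts thirteenL (PySem.Dict.empty, 0) with hs1
  have hr1 : ∀ v ∈ thirteenL,
      0 ≤ fD s1.1 v ∧ (fD s1.1 v < (hand.count v : Int) ↔ 2 ≤ (hand.count v : Int)) := by
    intro v hv
    rw [h1r v, fD_empty_apply]
    by_cases hvh : v ∈ hand
    · have hcnt : 0 < hand.count v := List.count_pos_iff.mpr hvh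
      rw [if_pos ⟨hv, hvh⟩]
      omega
    · have hcnt : hand.count v = 0 := List.count_eq_zero.mpr hvh
      rw [if_neg (fun h => hvh h.2), hcnt]
      norm_num
  have h2 := pass2_eq hand counts Hc thirteenL s1.2 s1.1 hr1
  have halt : Thirteen_orphans_alt hand
      = ((pass2B counts thirteenL (s1.1, s1.2)).2,
         (skipPass hand ((pass2B counts thirteenL (s1.1, s1.2)).1, [])).2) := by
    rw [hs1, hcounts]
    rfl
  rw [show Thirteen_orphans hand = pass2A thirteenL (pass1A thirteenL (0, hand)) from rfl,
    halt, skipPass_eq hand _ []]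
  conv_lhs => rw [hstart]
  rw [h1, h2]
  simp
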